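-- pv_equiv track=rewrite | github.com/abhirajD/NTQWERTYFirmware | tools/keymap_visualizer/visualize.py | parse_sensor_bindings
-- ===== SOURCE A (Python) =====
-- def parse_sensor_bindings(raw):
--     """Parse the content inside <...> of a sensor-bindings property.
--
--     Returns a list of sensor binding groups, one per encoder.
--     Each group is a list of tokens (behavior + args).
--
--     Formats:
--         <&inc_dec_kp UP DOWN &inc_dec_kp LEFT RIGHT>  → 2 groups (2-cell each)
--         <&mac_vol &scroll_up_down>                      → 2 groups (0-cell each)
--         <&bri_adjust &inc_dec_kp C_BRI_UP C_BRI_DN>    → 2 groups (mixed)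
--     """
--     tokens = raw.split()
--     groups = []
--     current = []
--     for tok in tokens:
--         if tok.startswith('&') and current:
--             groups.append(current)
--             current = [tok]
--         else:
--             current.append(tok)
--     if current:
--         groups.append(current)
--     return groups
-- ===== SOURCE B (Python) =====
-- def parse_sensor_bindings(raw):
--     tokens = raw.split()
--     if not tokens:
--         return []
--     groups = []
--     start = 0
--     for j in range(1, len(tokens)):
--         if tokens[j].startswith('&'):
--             groups.append(tokens[start:j])
--             start = j
--     groups.append(tokens[start:])
--     return groups
-- ===== Notes on version B (the rewrite author's own statement) =====
-- stated objective: alternative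
-- what changed: Replaces the incremental accumulator/state-machine (growing a current group token by token) with a single boundary scan over indices 1..n-1 that emits tokens[start:j] slices at each behavior token.
import Mathlib
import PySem

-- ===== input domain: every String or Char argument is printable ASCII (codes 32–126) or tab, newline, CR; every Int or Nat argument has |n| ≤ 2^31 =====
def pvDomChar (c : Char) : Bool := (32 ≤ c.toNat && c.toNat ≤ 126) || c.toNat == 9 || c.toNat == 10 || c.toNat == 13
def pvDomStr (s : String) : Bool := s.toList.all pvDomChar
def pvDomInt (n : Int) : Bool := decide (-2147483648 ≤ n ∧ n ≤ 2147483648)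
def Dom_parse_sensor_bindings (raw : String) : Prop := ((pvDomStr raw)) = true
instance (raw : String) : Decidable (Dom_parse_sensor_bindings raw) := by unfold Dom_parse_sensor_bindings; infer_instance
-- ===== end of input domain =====

-- B replaces A's accumulator state-machine by a boundary scan over indices emitting slices (alternative decomposition, same cost).

-- ===== PORT A =====
-- literal port of A: fold over tokens with state (groups, current); final flush of current
def parse_sensor_bindings (raw : String) : List (List String) :=
  let tokens := PySem.Str.split₀ raw
  let st := tokens.foldl
    (fun (st : List (List String) × List String) tok =>
      if PySem.Str.startswith tok "&" ∧ st.2 ≠ [] then (st.1 ++ [st.2], [tok])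
      else (st.1, st.2 ++ [tok]))
    ([], [])
  if st.2 ≠ [] then st.1 ++ [st.2] else st.1

-- ===== PORT B =====
-- literal port of B: scan j = 1 .. len-1, emit slice tokens[start:j] at each '&'-token, then tokens[start:]
def parse_sensor_bindings_alt (raw : String) : List (List String) :=
  let tokens := PySem.Str.split₀ raw
  if tokens = [] then []
  else
    let st := (PySem.List.pyRange 1 (tokens.length : Int) 1).foldl
      (fun (st : List (List String) × Int) j =>
        if PySem.Str.startswith (PySem.List.pyGetD tokens j "") "&"
        then (st.1 ++ [PySem.List.slice tokens (some st.2) (some j)], j)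
        else st)
      ([], 0)
    st.1 ++ [PySem.List.slice tokens (some st.2) none]

-- ===== PRECONDITION & SPEC =====
def Spec_parse_sensor_bindings (raw : String) (out : List (List String)) : Prop := out = parse_sensor_bindings_alt raw
instance (raw : String) (out : List (List String)) : Decidable (Spec_parse_sensor_bindings raw out) := by unfold Spec_parse_sensor_bindings; infer_instance

-- ===== CLAIM (what is proved, stated in full; the proofs are below) =====
def Claim_equal_parse_sensor_bindings : Prop := ∀ (raw : String), Dom_parse_sensor_bindings raw → Spec_parse_sensor_bindings raw (parse_sensor_bindings raw)

-- ===== LEMMAS AND PROOFS =====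

-- common reference: split token list into groups at '&'-tokens, first group seeded with cur
def pvChop (cur : List String) : List String → List (List String)
  | [] => [cur]
  | t :: ts =>
    if PySem.Str.startswith t "&" then cur :: pvChop [t] ts else pvChop (cur ++ [t]) ts

-- A's fold computes pvChop
theorem pvA_fold (ts : List String) : ∀ (groups : List (List String)) (cur : List String), cur ≠ [] →
    (let st := ts.foldl
      (fun (st : List (List String) × List String) tok =>
        if PySem.Str.startswith tok "&" ∧ st.2 ≠ [] then (st.1 ++ [st.2], [tok])
        else (st.1, st.2 ++ [tok]))
      (groups, cur);
     st.1 ++ [st.2]) = groups ++ pvChop cur ts := by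
  induction ts with
  | nil => intro groups cur h; simp [pvChop]
  | cons t ts ih =>
    intro groups cur h
    simp only [List.foldl_cons, pvChop]
    by_cases hs : PySem.Str.startswith t "&" = true
    · rw [if_pos ⟨hs, h⟩, if_pos hs, ih (groups ++ [cur]) [t] (by simp)]
      simp
    · rw [if_neg (fun hc => hs hc.1), if_neg hs]
      exact ih groups (cur ++ [t]) (by simp)

-- B's fold computes pvChop
theorem pvB_fold (tokens : List String) : ∀ (k : ℕ) (i : ℕ), tokens.length - i = k → ∀ (groups : List (List String)) (s : ℕ), s < i → i ≤ tokens.length →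
    (let st := (PySem.List.pyRange (i : Int) (tokens.length : Int) 1).foldl
      (fun (st : List (List String) × Int) j =>
        if PySem.Str.startswith (PySem.List.pyGetD tokens j "") "&"
        then (st.1 ++ [PySem.List.slice tokens (some st.2) (some j)], j)
        else st)
      (groups, (s : Int));
     st.1 ++ [PySem.List.slice tokens (some st.2) none]) =
    groups ++ pvChop ((tokens.drop s).take (i - s)) (tokens.drop i) := by
  intro k
  induction k with
  | zero =>
    intro i hk groups s hsi hin
    have hi : i = tokens.length := by omega
    subst hi
    rw [PySem.List.pyRange_one_eq_nil (by omega)]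
    simp only [List.foldl_nil]
    rw [PySem.List.slice_from_natCast]
    rw [List.take_of_length_le (by rw [List.length_drop])]
    simp [pvChop]
  | succ k ih =>
    intro i hk groups s hsi hin
    have hlt : i < tokens.length := by omega
    rw [PySem.List.pyRange_one_cons (by exact_mod_cast hlt)]
    simp only [List.foldl_cons]
    have hget : PySem.List.pyGetD tokens (i : Int) "" = tokens[i] := by
      rw [PySem.List.pyGetD_natCast]
      simp [List.getD, hlt]
    have hdropi : tokens.drop i = tokens[i] :: tokens.drop (i + 1) :=
      List.drop_eq_getElem_cons hlt
    by_cases hs : PySem.Str.startswith tokens[i] "&"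
    · rw [hget, if_pos hs]
      have := ih (i + 1) (by omega) (groups ++ [PySem.List.slice tokens (some (s : Int)) (some (i : Int))]) i (by omega) (by omega)
      simp only at this
      push_cast at this ⊢
      rw [this]
      rw [PySem.List.slice_natCast]
      rw [hdropi, pvChop, if_pos hs]
      have ht1 : List.take (i + 1 - i) (tokens[i] :: List.drop (i + 1) tokens) = [tokens[i]] := by
        rw [Nat.add_sub_cancel_left]
        rfl
      rw [ht1]
      simp
    · rw [hget, if_neg hs]
      have := ih (i + 1) (by omega) groups s (by omega) (by omega)
      simp only at this
      push_cast at this ⊢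
      rw [this]
      rw [hdropi, pvChop, if_neg hs]
      have hlen : i - s < (List.drop s tokens).length := by
        simp only [List.length_drop]; omega
      have hcur : List.take (i + 1 - s) (List.drop s tokens)
          = List.take (i - s) (List.drop s tokens) ++ [tokens[i]] := by
        have h2 : i + 1 - s = (i - s) + 1 := by omega
        rw [h2, List.take_add_one, List.getElem?_eq_getElem hlen]
        simp [List.getElem_drop, show s + (i - s) = i from by omega]
      rw [hcur]

theorem pvA_cur_ne (ts : List String) : ∀ (groups : List (List String)) (cur : List String), cur ≠ [] →
    (ts.foldl
      (fun (st : List (List String) × List String) tok =>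
        if PySem.Str.startswith tok "&" ∧ st.2 ≠ [] then (st.1 ++ [st.2], [tok])
        else (st.1, st.2 ++ [tok]))
      (groups, cur)).2 ≠ [] := by
  induction ts with
  | nil => intro _ _ h; exact h
  | cons t ts ih =>
    intro groups cur h
    simp only [List.foldl_cons]
    by_cases hs : PySem.Str.startswith t "&" = true ∧ cur ≠ []
    · rw [if_pos hs]; exact ih _ _ (by simp)
    · rw [if_neg hs]; exact ih _ _ (by simp)

theorem pv_main (tokens : List String) :
    (let st := tokens.foldl
      (fun (st : List (List String) × List String) tok =>
        if PySem.Str.startswith tok "&" ∧ st.2 ≠ [] then (st.1 ++ [st.2], [tok])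
        else (st.1, st.2 ++ [tok]))
      ([], []);
     if st.2 ≠ [] then st.1 ++ [st.2] else st.1) =
    (if tokens = [] then []
     else
      let st := (PySem.List.pyRange 1 (tokens.length : Int) 1).foldl
        (fun (st : List (List String) × Int) j =>
          if PySem.Str.startswith (PySem.List.pyGetD tokens j "") "&"
          then (st.1 ++ [PySem.List.slice tokens (some st.2) (some j)], j)
          else st)
        ([], 0)
      st.1 ++ [PySem.List.slice tokens (some st.2) none]) := by
  cases tokens with
  | nil => simp
  | cons t ts =>
    have hstep : (fun (st : List (List String) × List String) tok =>
        if PySem.Str.startswith tok "&" ∧ st.2 ≠ [] then (st.1 ++ [st.2], [tok])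
        else (st.1, st.2 ++ [tok])) ([], []) t = ([], [t]) := by simp
    simp only [List.foldl_cons, hstep]
    rw [if_pos (pvA_cur_ne ts [] [t] (by simp))]
    rw [if_neg (List.cons_ne_nil t ts)]
    have hA := pvA_fold ts [] [t] (by simp)
    simp only [List.nil_append] at hA
    rw [hA]
    have hB := pvB_fold (t :: ts) ts.length 1 (by simp) [] 0 (by omega) (by simp)
    simp only at hB
    push_cast at hB
    simp only [List.drop_zero, List.take_succ_cons, List.take_zero,
      List.drop_succ_cons, List.nil_append] at hB
    rw [hB]

-- ===== VERDICT (by name: the statement is the Claim_ definition above) =====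
theorem parse_sensor_bindings_spec : Claim_equal_parse_sensor_bindings := by
  intro raw _
  unfold Spec_parse_sensor_bindings parse_sensor_bindings parse_sensor_bindings_alt
  exact pv_main (PySem.Str.split₀ raw)
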